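-- pv_equiv track=rewrite | github.com/unlv-evol/PatchTrack | analyzer/totals.py | count_all_classifications
-- ===== SOURCE A (Python) =====
-- def count_all_classifications(pr_classes):
--     all_classes = {}
--
--     all_classes['PA']=0
--     all_classes['CC']=0
--     all_classes['PN']=0
--     all_classes['NE']=0
--     all_classes['ERROR']=0
--
--     for i in pr_classes:
--         key, value  = next(iter(i.items()))
--         v = value.get('class')
--         if v ==  'NE':
--             all_classes['NE'] += 1
--         elif v == 'PN':
--             all_classes['PN'] += 1
--         elif v == 'PA':
--             all_classes['PA'] += 1
--         elif v == 'CC':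
--             all_classes['CC'] += 1
--         elif v == 'ERROR':
--             all_classes['ERROR'] += 1
--     return all_classes
-- ===== SOURCE B (Python) =====
-- def count_all_classifications(pr_classes):
--     vs = []
--     for i in pr_classes:
--         key, value = next(iter(i.items()))
--         vs.append(value.get('class'))
--     return {k: vs.count(k) for k in ('PA', 'CC', 'PN', 'NE', 'ERROR')}
-- ===== Notes on version B (the rewrite author's own statement) =====
-- stated objective: alternative
-- what changed: Replaces the one-pass five-way if/elif tally with two stages: first extract the class value of every PR into a plain list, then count each of the five labels with a separate list.count scan over that list.
import Mathlib
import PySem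

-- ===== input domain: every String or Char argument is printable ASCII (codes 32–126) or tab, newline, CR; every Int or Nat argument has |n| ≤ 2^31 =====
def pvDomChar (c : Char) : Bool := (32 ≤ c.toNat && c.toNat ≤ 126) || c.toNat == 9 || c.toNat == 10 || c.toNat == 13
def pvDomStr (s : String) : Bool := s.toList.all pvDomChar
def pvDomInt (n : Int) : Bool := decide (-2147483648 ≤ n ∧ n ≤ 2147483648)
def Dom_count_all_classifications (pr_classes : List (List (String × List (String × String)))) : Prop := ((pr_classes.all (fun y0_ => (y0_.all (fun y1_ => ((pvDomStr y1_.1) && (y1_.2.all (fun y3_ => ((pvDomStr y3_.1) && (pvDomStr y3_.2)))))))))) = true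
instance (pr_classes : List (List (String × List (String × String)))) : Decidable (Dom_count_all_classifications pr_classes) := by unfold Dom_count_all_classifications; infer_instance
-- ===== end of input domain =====

-- B replaces A's one-pass if/elif tally by two stages: extract every PR's class value into a
-- list, then count each of the five labels with a separate list.count scan (alternative; same O(n)).

-- ===== PORT A =====
def count_all_classifications (pr_classes : List (List (String × List (String × String)))) : List (String × Int) :=
  let all0 : PySem.Dict String Int :=
    ((((PySem.Dict.empty.insert "PA" 0).insert "CC" 0).insert "PN" 0).insert "NE" 0).insert "ERROR" 0
  (pr_classes.foldl (fun all_classes i =>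
    match i.head? with
    | none => all_classes   -- next(iter(i.items())) raises StopIteration here; excluded by Pre_
    | some (_key, value) =>
      let v := (PySem.Dict.mk value).get? "class"   -- value.get('class')
      if v = some "NE" then all_classes.modify "NE" 0 (· + 1)
      else if v = some "PN" then all_classes.modify "PN" 0 (· + 1)
      else if v = some "PA" then all_classes.modify "PA" 0 (· + 1)
      else if v = some "CC" then all_classes.modify "CC" 0 (· + 1)
      else if v = some "ERROR" then all_classes.modify "ERROR" 0 (· + 1)
      else all_classes) all0).items

-- ===== PORT B =====
def count_all_classifications_alt (pr_classes : List (List (String × List (String × String)))) : List (String × Int) :=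
  let vs : List (Option String) := pr_classes.foldl (fun vs i =>
    match i.head? with
    | none => vs   -- next(iter(i.items())) raises StopIteration here; excluded by Pre_
    | some (_key, value) => vs ++ [(PySem.Dict.mk value).get? "class"]) []   -- vs.append(value.get('class'))
  ["PA", "CC", "PN", "NE", "ERROR"].map (fun k => (k, (PySem.List.count vs (some k) : Int)))

-- ===== PRECONDITION & SPEC =====
-- Pre_ excludes inputs containing an empty inner dict: there Python A (and B) raises StopIteration.
def Pre_count_all_classifications (pr_classes : List (List (String × List (String × String)))) : Prop :=
  ∀ i ∈ pr_classes, i ≠ []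
instance (pr_classes : List (List (String × List (String × String)))) : Decidable (Pre_count_all_classifications pr_classes) := by unfold Pre_count_all_classifications; infer_instance
def pvWitness_count_all_classifications : (List (List (String × List (String × String)))) :=
  [[("pr1", [("class", "PA")])], [("pr2", [("class", "NE")])]]

def Spec_count_all_classifications (pr_classes : List (List (String × List (String × String)))) (out : List (String × Int)) : Prop := out = count_all_classifications_alt pr_classes
instance (pr_classes : List (List (String × List (String × String)))) (out : List (String × Int)) : Decidable (Spec_count_all_classifications pr_classes out) := by unfold Spec_count_all_classifications; infer_instance

-- ===== CLAIM (what is proved, stated in full; the proofs are below) =====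
def Claim_equal_count_all_classifications : Prop := ∀ (pr_classes : List (List (String × List (String × String)))), Dom_count_all_classifications pr_classes → Pre_count_all_classifications pr_classes → Spec_count_all_classifications pr_classes (count_all_classifications pr_classes)

-- ===== LEMMAS AND PROOFS =====

-- B's second stage (the five per-label counts of a value list) as a function of that list.
def pvProj (vs : List (Option String)) : List (String × Int) :=
  ["PA", "CC", "PN", "NE", "ERROR"].map (fun k => (k, (PySem.List.count vs (some k) : Int)))

theorem pvStep_NE (vs : List (Option String)) :
    ((PySem.Dict.mk (pvProj vs)).modify "NE" 0 (· + 1)) = PySem.Dict.mk (pvProj (vs ++ [some "NE"])) := by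
  simp [pvProj, PySem.Dict.modify, PySem.Dict.insert, PySem.Dict.getD,
    PySem.Dict.get?, PySem.Dict.contains]

theorem pvStep_PN (vs : List (Option String)) :
    ((PySem.Dict.mk (pvProj vs)).modify "PN" 0 (· + 1)) = PySem.Dict.mk (pvProj (vs ++ [some "PN"])) := by
  simp [pvProj, PySem.Dict.modify, PySem.Dict.insert, PySem.Dict.getD,
    PySem.Dict.get?, PySem.Dict.contains]

theorem pvStep_PA (vs : List (Option String)) :
    ((PySem.Dict.mk (pvProj vs)).modify "PA" 0 (· + 1)) = PySem.Dict.mk (pvProj (vs ++ [some "PA"])) := by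
  simp [pvProj, PySem.Dict.modify, PySem.Dict.insert, PySem.Dict.getD,
    PySem.Dict.get?, PySem.Dict.contains]

theorem pvStep_CC (vs : List (Option String)) :
    ((PySem.Dict.mk (pvProj vs)).modify "CC" 0 (· + 1)) = PySem.Dict.mk (pvProj (vs ++ [some "CC"])) := by
  simp [pvProj, PySem.Dict.modify, PySem.Dict.insert, PySem.Dict.getD,
    PySem.Dict.get?, PySem.Dict.contains]

theorem pvStep_ERROR (vs : List (Option String)) :
    ((PySem.Dict.mk (pvProj vs)).modify "ERROR" 0 (· + 1)) = PySem.Dict.mk (pvProj (vs ++ [some "ERROR"])) := by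
  simp [pvProj, PySem.Dict.modify, PySem.Dict.insert, PySem.Dict.getD,
    PySem.Dict.get?, PySem.Dict.contains]

theorem pvProj_append_other (vs : List (Option String)) (v : Option String)
    (h1 : ¬ v = some "NE") (h2 : ¬ v = some "PN") (h3 : ¬ v = some "PA")
    (h4 : ¬ v = some "CC") (h5 : ¬ v = some "ERROR") :
    pvProj (vs ++ [v]) = pvProj vs := by
  simp [pvProj, h1, h2, h3, h4, h5]

-- Loop invariant: A's accumulator is always the Dict holding B's counts of B's extracted list so far.
theorem pvLoop (l : List (List (String × List (String × String)))) (vs : List (Option String)) :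
    (l.foldl (fun all_classes i =>
      match i.head? with
      | none => all_classes
      | some (_key, value) =>
        let v := (PySem.Dict.mk value).get? "class"
        if v = some "NE" then all_classes.modify "NE" 0 (· + 1)
        else if v = some "PN" then all_classes.modify "PN" 0 (· + 1)
        else if v = some "PA" then all_classes.modify "PA" 0 (· + 1)
        else if v = some "CC" then all_classes.modify "CC" 0 (· + 1)
        else if v = some "ERROR" then all_classes.modify "ERROR" 0 (· + 1)
        else all_classes) (PySem.Dict.mk (pvProj vs)))
    = PySem.Dict.mk (pvProj (l.foldl (fun vs i =>
      match i.head? with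
      | none => vs
      | some (_key, value) => vs ++ [(PySem.Dict.mk value).get? "class"]) vs)) := by
  induction l generalizing vs with
  | nil => rfl
  | cons i rest ih =>
    simp only [List.foldl_cons]
    cases hh : i.head? with
    | none => exact ih vs
    | some kv =>
      obtain ⟨k, value⟩ := kv
      simp only
      by_cases h1 : (PySem.Dict.mk value).get? "class" = some "NE"
      · simp only [h1, reduceIte]; rw [pvStep_NE vs, show vs ++ [some "NE"] = vs ++ [(PySem.Dict.mk value).get? "class"] from by rw [h1]]; exact ih _
      · by_cases h2 : (PySem.Dict.mk value).get? "class" = some "PN"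
        · simp only [h2, reduceIte]; rw [pvStep_PN vs, show vs ++ [some "PN"] = vs ++ [(PySem.Dict.mk value).get? "class"] from by rw [h2]]; exact ih _
        · by_cases h3 : (PySem.Dict.mk value).get? "class" = some "PA"
          · simp only [h3, reduceIte]; rw [pvStep_PA vs, show vs ++ [some "PA"] = vs ++ [(PySem.Dict.mk value).get? "class"] from by rw [h3]]; exact ih _
          · by_cases h4 : (PySem.Dict.mk value).get? "class" = some "CC"
            · simp only [h4, reduceIte]; rw [pvStep_CC vs, show vs ++ [some "CC"] = vs ++ [(PySem.Dict.mk value).get? "class"] from by rw [h4]]; exact ih _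
            · by_cases h5 : (PySem.Dict.mk value).get? "class" = some "ERROR"
              · simp only [h5, reduceIte]; rw [pvStep_ERROR vs, show vs ++ [some "ERROR"] = vs ++ [(PySem.Dict.mk value).get? "class"] from by rw [h5]]; exact ih _
              · simp only [if_neg h1, if_neg h2, if_neg h3, if_neg h4, if_neg h5]
                have e := pvProj_append_other vs ((PySem.Dict.mk value).get? "class") h1 h2 h3 h4 h5
                rw [← e]; exact ih _

-- ===== VERDICT (by name: the statement is the Claim_ definition above) =====
theorem count_all_classifications_spec : Claim_equal_count_all_classifications := by
  intro pr_classes _dom _pre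
  have h0 : ((((PySem.Dict.empty.insert "PA" (0 : Int)).insert "CC" 0).insert "PN" 0).insert "NE" 0).insert "ERROR" 0
      = PySem.Dict.mk (pvProj []) := by decide
  show _ = _
  simp only [count_all_classifications, count_all_classifications_alt]
  rw [h0, pvLoop pr_classes []]
  rfl
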